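-- pv_equiv track=rewrite | github.com/FLOPBench/SC26FLOPBench | gpuFLOPBench-agentic/helper-scripts/find_duplicate_kernels.py | skip_block
-- ===== SOURCE A (Python) =====
-- def skip_block(text: str, idx: int, open_char: str, close_char: str) -> int:
--     depth = 0
--     length = len(text)
--     while idx < length:
--         ch = text[idx]
--         if ch == open_char:
--             depth += 1
--         elif ch == close_char:
--             depth -= 1
--             if depth == 0:
--                 return idx + 1
--         elif ch in ('"', "'"):
--             quote = ch
--             idx += 1
--             while idx < length:
--                 if text[idx] == '\\':
--                     idx += 2
--                     continue
--                 if text[idx] == quote: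
--                     idx += 1
--                     break
--                 idx += 1
--             continue
--         idx += 1
--     return idx
-- ===== SOURCE B (Python) =====
-- def _skip_string(text, idx, quote):
--     # Return the index just past the string literal whose opening quote is at idx-1.
--     n = len(text)
--     while idx < n:
--         c = text[idx]
--         if c == '\\':
--             idx += 2
--         elif c == quote:
--             return idx + 1
--         else:
--             idx += 1
--     return idx
--
--
-- def _code_events(text, idx, open_char, close_char):
--     # Stage 1: list of (position, char) for code outside string literals,
--     # plus the index where the scan stopped.  A quote that is itself the
--     # requested bracket character counts as a bracket, not a string start.
--     n = len(text)
--     events = []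
--     while idx < n:
--         ch = text[idx]
--         if ch in ('"', "'") and ch != open_char and ch != close_char:
--             idx = _skip_string(text, idx + 1, ch)
--         else:
--             events.append((idx, ch))
--             idx += 1
--     return events, idx
--
--
-- def skip_block(text: str, idx: int, open_char: str, close_char: str) -> int:
--     # Two staged passes: tokenize the non-string code into events, then fold
--     # a bracket-depth counter over the event list.
--     events, end_idx = _code_events(text, idx, open_char, close_char)
--     depth = 0
--     for pos, ch in events:
--         if ch == open_char:
--             depth += 1
--         elif ch == close_char:
--             depth -= 1
--             if depth == 0:
--                 return pos + 1
--     return end_idx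
-- ===== Notes on version B (the rewrite author's own statement) =====
-- stated objective: alternative
-- what changed: Replaced A's single interleaved scan (nested string-skipping loop inside the depth-counting loop) by two staged passes: a tokenizer that first builds the list of (position, char) events lying outside string literals, then a pure fold of a bracket-depth counter over that event list.
import Mathlib
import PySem

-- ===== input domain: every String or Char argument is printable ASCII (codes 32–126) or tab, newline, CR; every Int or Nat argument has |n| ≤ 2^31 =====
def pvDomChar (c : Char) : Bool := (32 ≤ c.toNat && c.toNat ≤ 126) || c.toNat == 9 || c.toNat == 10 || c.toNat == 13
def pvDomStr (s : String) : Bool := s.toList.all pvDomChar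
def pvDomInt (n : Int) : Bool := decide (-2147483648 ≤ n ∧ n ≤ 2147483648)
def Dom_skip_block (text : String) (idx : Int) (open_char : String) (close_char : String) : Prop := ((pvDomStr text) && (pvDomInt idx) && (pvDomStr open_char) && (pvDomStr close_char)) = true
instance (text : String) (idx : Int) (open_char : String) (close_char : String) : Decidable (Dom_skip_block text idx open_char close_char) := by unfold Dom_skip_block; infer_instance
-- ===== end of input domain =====

-- B restructures A's interleaved scan into two staged passes (tokenize the
-- non-string code into an event list, then fold a depth counter over it);
-- objective: alternative decomposition, same asymptotic cost.
-- Loops are encoded with fuel (idx strictly increases, so (len - idx).toNat + 1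
-- fuel always suffices; fuel 0 coincides with the loop-exit return).

-- ===== PORT A =====
-- A's inner `while` loop (string scanning).  Where Python would raise
-- IndexError (pyGet? = none), the port returns the current idx; such inputs
-- are excluded by Pre_skip_block.
def aInner (cs : List Char) (len : Int) (quote : Char) : Nat → Int → Int
  | 0, idx => idx
  | fuel + 1, idx =>
    if idx < len then
      match PySem.List.pyGet? cs idx with
      | none => idx
      | some c =>
        if c = '\\' then aInner cs len quote fuel (idx + 2)
        else if c = quote then idx + 1
        else aInner cs len quote fuel (idx + 1)
    else idx

-- A's outer `while` loop
def aOuter (cs : List Char) (len : Int) (oc cc : String) : Nat → Int → Int → Int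
  | 0, _, idx => idx
  | fuel + 1, depth, idx =>
    if idx < len then
      match PySem.List.pyGet? cs idx with
      | none => idx
      | some c =>
        if String.ofList [c] = oc then aOuter cs len oc cc fuel (depth + 1) (idx + 1)
        else if String.ofList [c] = cc then
          (if depth - 1 = 0 then idx + 1 else aOuter cs len oc cc fuel (depth - 1) (idx + 1))
        else if c = '"' ∨ c = '\'' then aOuter cs len oc cc fuel depth (aInner cs len c fuel (idx + 1))
        else aOuter cs len oc cc fuel depth (idx + 1)
    else idx

def skip_block (text : String) (idx : Int) (open_char : String) (close_char : String) : Int :=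
  aOuter text.toList (text.toList.length : Int) open_char close_char
    (((text.toList.length : Int) - idx).toNat + 1) 0 idx

-- ===== PORT B =====
-- B's _skip_string helper
def bSkipString (cs : List Char) (len : Int) (quote : Char) : Nat → Int → Int
  | 0, idx => idx
  | fuel + 1, idx =>
    if idx < len then
      match PySem.List.pyGet? cs idx with
      | none => idx
      | some c =>
        if c = '\\' then bSkipString cs len quote fuel (idx + 2)
        else if c = quote then idx + 1
        else bSkipString cs len quote fuel (idx + 1)
    else idx

-- B's _code_events: (event list, stop index)
def bEvents (cs : List Char) (len : Int) (oc cc : String) : Nat → Int → List (Int × Char) × Int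
  | 0, idx => ([], idx)
  | fuel + 1, idx =>
    if idx < len then
      match PySem.List.pyGet? cs idx with
      | none => ([], idx)
      | some c =>
        if (c = '"' ∨ c = '\'') ∧ String.ofList [c] ≠ oc ∧ String.ofList [c] ≠ cc then
          bEvents cs len oc cc fuel (bSkipString cs len c fuel (idx + 1))
        else
          let r := bEvents cs len oc cc fuel (idx + 1)
          ((idx, c) :: r.1, r.2)
    else ([], idx)

-- B's stage-2 fold over the event list
def bFold (oc cc : String) (endIdx : Int) : List (Int × Char) → Int → Int
  | [], _ => endIdx
  | (pos, c) :: rest, depth =>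
    if String.ofList [c] = oc then bFold oc cc endIdx rest (depth + 1)
    else if String.ofList [c] = cc then
      (if depth - 1 = 0 then pos + 1 else bFold oc cc endIdx rest (depth - 1))
    else bFold oc cc endIdx rest depth

def skip_block_alt (text : String) (idx : Int) (open_char : String) (close_char : String) : Int :=
  let r := bEvents text.toList (text.toList.length : Int) open_char close_char
    (((text.toList.length : Int) - idx).toNat + 1) idx
  bFold open_char close_char r.2 r.1 0

-- ===== PRECONDITION & SPEC =====
-- Pre_ excludes exactly the inputs on which Python A raises IndexError: idx < -len(text).
def Pre_skip_block (text : String) (idx : Int) (open_char : String) (close_char : String) : Prop :=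
  -(text.toList.length : Int) ≤ idx
instance (text : String) (idx : Int) (open_char : String) (close_char : String) : Decidable (Pre_skip_block text idx open_char close_char) := by unfold Pre_skip_block; infer_instance

def pvWitness_skip_block : String × Int × String × String := ("f('(x)') { a[1]; }", 9, "{", "}")

def Spec_skip_block (text : String) (idx : Int) (open_char : String) (close_char : String) (out : Int) : Prop := out = skip_block_alt text idx open_char close_char
instance (text : String) (idx : Int) (open_char : String) (close_char : String) (out : Int) : Decidable (Spec_skip_block text idx open_char close_char out) := by unfold Spec_skip_block; infer_instance

-- ===== CLAIM (what is proved, stated in full; the proofs are below) =====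
def Claim_equal_skip_block : Prop := ∀ (text : String) (idx : Int) (open_char : String) (close_char : String), Dom_skip_block text idx open_char close_char → Pre_skip_block text idx open_char close_char → Spec_skip_block text idx open_char close_char (skip_block text idx open_char close_char)

-- ===== LEMMAS AND PROOFS =====

-- A's inner loop and B's _skip_string are the same recursion
theorem bSkipString_eq_aInner (cs : List Char) (len : Int) (q : Char) :
    ∀ (fuel : Nat) (idx : Int), bSkipString cs len q fuel idx = aInner cs len q fuel idx := by
  intro fuel
  induction fuel with
  | zero => intro idx; rfl
  | succ f ih =>
    intro idx
    rw [bSkipString, aInner]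
    split_ifs with h
    · cases PySem.List.pyGet? cs idx with
      | none => rfl
      | some c =>
        dsimp only
        split_ifs with h1 h2
        · exact ih (idx + 2)
        · rfl
        · exact ih (idx + 1)
    · rfl

-- the inner loop never moves idx backwards
theorem aInner_ge (cs : List Char) (len : Int) (q : Char) :
    ∀ (fuel : Nat) (idx : Int), idx ≤ aInner cs len q fuel idx := by
  intro fuel
  induction fuel with
  | zero => intro idx; simp [aInner]
  | succ f ih =>
    intro idx
    rw [aInner]
    split_ifs with h
    · cases hg : PySem.List.pyGet? cs idx with
      | none => simp
      | some c =>
        dsimp only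
        split_ifs with h1 h2
        · have := ih (idx + 2); omega
        · omega
        · have := ih (idx + 1); omega
    · omega

-- main correspondence: A's interleaved loop equals B's tokenize-then-fold
theorem aOuter_eq_staged (cs : List Char) (len : Int) (oc cc : String) :
    ∀ (fuel : Nat) (depth idx : Int), (len - idx).toNat ≤ fuel →
      aOuter cs len oc cc fuel depth idx =
        bFold oc cc (bEvents cs len oc cc fuel idx).2 (bEvents cs len oc cc fuel idx).1 depth := by
  intro fuel
  induction fuel with
  | zero => intro depth idx _; rfl
  | succ f ih =>
    intro depth idx hf
    by_cases hlen : idx < len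
    · cases hgc : PySem.List.pyGet? cs idx with
      | none =>
        rw [aOuter, bEvents]
        simp [hlen, hgc, bFold]
      | some c =>
        by_cases hq : (c = '"' ∨ c = '\'') ∧ String.ofList [c] ≠ oc ∧ String.ofList [c] ≠ cc
        · -- quote starting a string literal: both sides skip the string
          obtain ⟨h3, h1, h2⟩ := hq
          have hb : bEvents cs len oc cc (f + 1) idx
              = bEvents cs len oc cc f (bSkipString cs len c f (idx + 1)) := by
            rw [bEvents]
            rw [if_pos hlen, hgc]; dsimp only
            rw [if_pos ⟨h3, h1, h2⟩]
          rw [hb, aOuter]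
          rw [if_pos hlen, hgc]; dsimp only
          rw [if_neg h1, if_neg h2, if_pos h3]
          rw [bSkipString_eq_aInner]
          exact ih depth (aInner cs len c f (idx + 1))
            (by have := aInner_ge cs len c f (idx + 1); omega)
        · -- an event at idx
          have hb : bEvents cs len oc cc (f + 1) idx
              = ((idx, c) :: (bEvents cs len oc cc f (idx + 1)).1,
                 (bEvents cs len oc cc f (idx + 1)).2) := by
            rw [bEvents]
            rw [if_pos hlen, hgc]; dsimp only
            rw [if_neg hq]
          rw [hb, aOuter]
          rw [if_pos hlen, hgc]; dsimp only
          rw [bFold]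
          by_cases h1 : String.ofList [c] = oc
          · rw [if_pos h1, if_pos h1]
            exact ih (depth + 1) (idx + 1) (by omega)
          · rw [if_neg h1, if_neg h1]
            by_cases h2 : String.ofList [c] = cc
            · rw [if_pos h2, if_pos h2]
              by_cases hd : depth - 1 = 0
              · rw [if_pos hd, if_pos hd]
              · rw [if_neg hd, if_neg hd]
                exact ih (depth - 1) (idx + 1) (by omega)
            · rw [if_neg h2, if_neg h2]
              have h3 : ¬ (c = '"' ∨ c = '\'') := fun h => hq ⟨h, h1, h2⟩
              rw [if_neg h3]
              exact ih depth (idx + 1) (by omega)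
    · rw [aOuter, bEvents]
      simp [hlen, bFold]

-- ===== VERDICT (by name: the statement is the Claim_ definition above) =====
theorem skip_block_spec : Claim_equal_skip_block := by
  intro text idx oc cc _ _
  unfold Spec_skip_block skip_block skip_block_alt
  exact aOuter_eq_staged _ _ _ _ _ 0 idx (by omega)
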